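-- pv_equiv track=rewrite | github.com/farkon00/binarian | blocks_parser.py | parse_lists
-- ===== SOURCE A (Python) =====
-- def parse_lists(lexic : list[str]):
--     arrays_opened = 0
--     merged = 0
--
--     for i in range(len(lexic)):
--         now_lex = lexic[i-merged]
--
--         if arrays_opened > 0:
--             lexic[i-1-merged] += " " + now_lex
--             del lexic[i-merged]
--             merged += 1
--
--         arrays_opened += now_lex.count("[")
--         arrays_opened -= now_lex.count("]")
--
--     return lexic
-- ===== SOURCE B (Python) =====
-- def parse_lists(lexic: list[str]):
--     out = []
--     depth = 0
--     for tok in lexic: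
--         if depth > 0:
--             out[-1] += " " + tok
--         else:
--             out.append(tok)
--         depth += tok.count("[") - tok.count("]")
--     return out
-- ===== Notes on version B (the rewrite author's own statement) =====
-- stated objective: alternative
-- what changed: Replaces A's in-place merging via index arithmetic (i-merged bookkeeping, element mutation and del on the input list) with a single forward pass that builds a fresh output list, appending each token or joining it onto the last group while bracket depth is positive.
import Mathlib
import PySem

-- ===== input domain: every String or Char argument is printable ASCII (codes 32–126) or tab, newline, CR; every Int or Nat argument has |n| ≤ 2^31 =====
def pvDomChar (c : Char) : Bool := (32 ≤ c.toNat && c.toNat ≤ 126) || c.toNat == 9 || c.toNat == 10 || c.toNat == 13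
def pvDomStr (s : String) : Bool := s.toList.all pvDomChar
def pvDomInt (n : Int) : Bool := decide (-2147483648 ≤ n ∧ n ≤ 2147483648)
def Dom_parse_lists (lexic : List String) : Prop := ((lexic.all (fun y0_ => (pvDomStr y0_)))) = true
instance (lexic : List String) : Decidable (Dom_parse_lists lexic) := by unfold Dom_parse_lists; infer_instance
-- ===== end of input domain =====

-- B replaces A's in-place merging via index arithmetic (`i-merged` bookkeeping and `del`) by one
-- pass that builds a fresh output list, joining each token onto the last group while the bracket
-- depth is positive (objective: alternative). A mutates its argument in place and returns it; B
-- leaves the input untouched — the equivalence proved here is about the RETURN value.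

-- ===== PORT A =====
-- one iteration of A's `for i in range(len(lexic))` body over state (lexic, arrays_opened, merged).
-- The `.toNat` on the two write indices is exact here: on every input they are nonnegative and in
-- range whenever the branch is taken (merged ≤ i-1), as the invariant in the proof below shows.
def pvStepA (st : List String × Int × Int) (i : Nat) : List String × Int × Int :=
  let lst := st.1
  let opened := st.2.1
  let merged := st.2.2
  let now := (PySem.List.pyGet? lst ((i : Int) - merged)).getD ""
  let lst' := if opened > 0 then
      (lst.set ((i : Int) - 1 - merged).toNat
        (((PySem.List.pyGet? lst ((i : Int) - 1 - merged)).getD "") ++ " " ++ now)).eraseIdx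
        (((i : Int) - merged).toNat)
    else lst
  let merged' := if opened > 0 then merged + 1 else merged
  (lst', opened + (PySem.Str.count now "[" : Int) - (PySem.Str.count now "]" : Int), merged')

def parse_lists (lexic : List String) : List String :=
  ((List.range lexic.length).foldl pvStepA (lexic, 0, 0)).1

-- ===== PORT B =====
-- one iteration of B's loop over state (out, depth); `out[-1] += " " + tok` / `out.append(tok)`.
def pvStepB (st : List String × Int) (tok : String) : List String × Int :=
  let out := if st.2 > 0 then st.1.dropLast ++ [(st.1.getLast?.getD "") ++ " " ++ tok]
             else st.1 ++ [tok]
  (out, st.2 + (PySem.Str.count tok "[" : Int) - (PySem.Str.count tok "]" : Int))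

def parse_lists_alt (lexic : List String) : List String :=
  (lexic.foldl pvStepB ([], 0)).1

-- ===== PRECONDITION & SPEC =====
def Spec_parse_lists (lexic : List String) (out : List String) : Prop := out = parse_lists_alt lexic
instance (lexic : List String) (out : List String) : Decidable (Spec_parse_lists lexic out) := by unfold Spec_parse_lists; infer_instance

-- ===== CLAIM (what is proved, stated in full; the proofs are below) =====
def Claim_equal_parse_lists : Prop := ∀ (lexic : List String), Dom_parse_lists lexic → Spec_parse_lists lexic (parse_lists lexic)

-- ===== LEMMAS AND PROOFS =====

-- Invariant: after processing the first i tokens, A's list is B's output ++ the unprocessed suffix,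
-- A's merged counter is i - out.length, and the two depth counters coincide.
theorem pv_loop_eq (ts : List String) : ∀ (out : List String) (depth : Int) (i : Nat),
    out.length ≤ i → (0 < depth → out ≠ []) →
    ((List.range' i ts.length).foldl pvStepA (out ++ ts, depth, ((i : Int) - out.length))).1
      = (ts.foldl pvStepB (out, depth)).1 := by
  induction ts with
  | nil => intro out depth i _ _; simp
  | cons t ts ih =>
    intro out depth i hle hne
    rw [List.length_cons, List.range'_succ, List.foldl_cons, List.foldl_cons]
    by_cases hd : 0 < depth
    · -- merge branch
      have hout : out ≠ [] := hne hd
      obtain ⟨o, x, rfl⟩ : ∃ o x, out = o ++ [x] :=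
        ⟨out.dropLast, out.getLast hout, (List.dropLast_concat_getLast hout).symm⟩
      have h1 : (i:Int) - ((i:Int) - (o ++ [x]).length) = (((o.length + 1 : Nat)) : Int) := by
        simp only [List.length_append, List.length_cons, List.length_nil]; omega
      have hnow : (PySem.List.pyGet? ((o ++ [x]) ++ t :: ts)
          ((i:Int) - ((i:Int) - (o ++ [x]).length))).getD "" = t := by
        rw [h1, PySem.List.pyGet?_natCast]
        rw [show (o ++ [x]) ++ t :: ts = (o ++ [x]) ++ t :: ts from rfl,
          List.getElem?_append_right (by simp)]
        simp
      have h2 : (i:Int) - 1 - ((i:Int) - (o ++ [x]).length) = ((o.length : Nat) : Int) := by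
        simp only [List.length_append, List.length_cons, List.length_nil]; omega
      have hprev : (PySem.List.pyGet? ((o ++ [x]) ++ t :: ts)
          ((i:Int) - 1 - ((i:Int) - (o ++ [x]).length))).getD "" = x := by
        rw [h2, PySem.List.pyGet?_natCast, List.getElem?_append_left (by simp),
          List.getElem?_append_right (by simp)]
        simp
      have ht1 : ((i:Int) - 1 - ((i:Int) - (o ++ [x]).length)).toNat = o.length := by
        simp only [List.length_append, List.length_cons, List.length_nil]; omega
      have ht2 : ((i:Int) - ((i:Int) - (o ++ [x]).length)).toNat = o.length + 1 := by
        simp only [List.length_append, List.length_cons, List.length_nil]; omega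
      have hset : (((o ++ [x]) ++ t :: ts).set
            ((i:Int) - 1 - ((i:Int) - (o ++ [x]).length)).toNat (x ++ " " ++ t)).eraseIdx
            (((i:Int) - ((i:Int) - (o ++ [x]).length)).toNat)
          = (o ++ [x ++ " " ++ t]) ++ ts := by
        rw [ht1, ht2, List.set_append_left _ _ (by simp),
          List.set_append_right _ _ (by simp)]
        simp only [Nat.sub_self, List.set_cons_zero]
        rw [List.eraseIdx_append_of_length_le (by simp)]
        simp
      simp only [pvStepA, pvStepB, if_pos hd, hnow, hprev, hset]
      simp only [List.getLast?_concat, Option.getD_some, List.dropLast_concat]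
      have hm : ((i:Int) - (o ++ [x]).length) + 1
          = ((i + 1 : Nat) : Int) - (o ++ [x ++ " " ++ t]).length := by
        simp; ring
      rw [hm]
      exact ih _ _ (i+1) (by simp at hle ⊢; omega) (fun _ => by simp)
    · -- append branch
      have hnow : (PySem.List.pyGet? (out ++ t :: ts) ((i:Int) - ((i:Int) - out.length))).getD ""
          = t := by
        have h1 : ((i : Int) - ((i : Int) - out.length)) = ((out.length : Nat) : Int) := by omega
        rw [h1, PySem.List.pyGet?_natCast, List.getElem?_append_right (by simp)]
        simp
      simp only [pvStepA, pvStepB, if_neg hd, hnow]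
      have hm : ((i:Int) - out.length) = ((i + 1 : Nat) : Int) - (out ++ [t]).length := by
        simp only [List.length_append, List.length_cons, List.length_nil]; push_cast; ring
      rw [show out ++ t :: ts = (out ++ [t]) ++ ts by simp, hm]
      exact ih (out ++ [t]) _ (i+1) (by simp; omega) (fun _ => by simp)

-- ===== VERDICT (by name: the statement is the Claim_ definition above) =====
theorem parse_lists_spec : Claim_equal_parse_lists := by
  intro lexic _
  unfold Spec_parse_lists parse_lists parse_lists_alt
  have := pv_loop_eq lexic [] 0 0 (by simp) (by simp)
  simpa [List.range_eq_range'] using this
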